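-- pv_equiv track=rewrite | github.com/MichaelMachu/diploma | Domain/NeuronMatrix.py | __create_weighted_matrix
-- ===== SOURCE A (Python) =====
-- def __create_weighted_matrix(serializedMatrix: list) -> list:
--     result_array = []
--     for i in range(len(serializedMatrix)):
--         array = []
--         for j in range(len(serializedMatrix)):
--             result = serializedMatrix[i] * serializedMatrix[j]
--             array.append(result)
--         result_array.append(array)
--
--     return result_array
-- ===== SOURCE B (Python) =====
-- def __create_weighted_matrix(serializedMatrix: list) -> list:
--     n = len(serializedMatrix)
--     result = [[0] * n for _ in range(n)]
--     for i in range(n):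
--         for j in range(i, n):
--             p = serializedMatrix[i] * serializedMatrix[j]
--             result[i][j] = p
--             result[j][i] = p
--     return result
-- ===== Notes on version B (the rewrite author's own statement) =====
-- stated objective: alternative
-- what changed: B pre-allocates an n x n zero matrix and traverses only the upper triangle, computing each off-diagonal product once and mirroring it by symmetry, instead of A's full nested append loops.
import Mathlib
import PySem

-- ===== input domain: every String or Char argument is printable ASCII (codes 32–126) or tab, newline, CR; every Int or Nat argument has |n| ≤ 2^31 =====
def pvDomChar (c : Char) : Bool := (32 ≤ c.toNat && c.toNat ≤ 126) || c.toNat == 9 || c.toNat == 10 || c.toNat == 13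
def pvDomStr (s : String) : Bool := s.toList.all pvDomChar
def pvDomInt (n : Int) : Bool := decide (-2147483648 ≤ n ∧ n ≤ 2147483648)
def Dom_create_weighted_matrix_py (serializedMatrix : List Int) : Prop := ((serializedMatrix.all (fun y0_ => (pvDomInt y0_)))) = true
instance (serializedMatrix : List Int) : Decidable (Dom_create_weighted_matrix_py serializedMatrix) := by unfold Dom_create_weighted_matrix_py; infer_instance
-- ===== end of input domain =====

-- B pre-allocates the n×n zero matrix and fills only the upper triangle, mirroring each
-- product by symmetry, instead of A's row-by-row append of all n² products.

-- ===== PORT A =====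
def create_weighted_matrix_py (serializedMatrix : List Int) : List (List Int) :=
  (PySem.List.pyRange 0 (serializedMatrix.length : Int) 1).foldl
    (fun result_array i =>
      result_array ++
        [(PySem.List.pyRange 0 (serializedMatrix.length : Int) 1).foldl
          (fun array j =>
            array ++ [PySem.List.pyGetD serializedMatrix i 0 * PySem.List.pyGetD serializedMatrix j 0])
          []])
    []

-- ===== PORT B =====
-- result[i][j] = v  (indices produced by range are nonnegative and in bounds, so Nat indexing is exact)
def pvSetAt (m : List (List Int)) (i j : Nat) (v : Int) : List (List Int) :=
  m.modify i (fun row => row.set j v)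

-- body of B's inner loop: p = s[i]*s[j]; result[i][j] = p; result[j][i] = p
def pvFillStep (s : List Int) (i : Nat) (result : List (List Int)) (j : Nat) : List (List Int) :=
  let p := s.getD i 0 * s.getD j 0
  pvSetAt (pvSetAt result i j p) j i p

def create_weighted_matrix_py_alt (serializedMatrix : List Int) : List (List Int) :=
  (List.range serializedMatrix.length).foldl
    (fun result i =>
      (List.range' i (serializedMatrix.length - i)).foldl (pvFillStep serializedMatrix i) result)
    (List.replicate serializedMatrix.length (List.replicate serializedMatrix.length 0))

-- ===== PRECONDITION & SPEC =====
def Spec_create_weighted_matrix_py (serializedMatrix : List Int) (out : List (List Int)) : Prop := out = create_weighted_matrix_py_alt serializedMatrix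
instance (serializedMatrix : List Int) (out : List (List Int)) : Decidable (Spec_create_weighted_matrix_py serializedMatrix out) := by unfold Spec_create_weighted_matrix_py; infer_instance

-- ===== CLAIM (what is proved, stated in full; the proofs are below) =====
def Claim_equal_create_weighted_matrix_py : Prop := ∀ (serializedMatrix : List Int), Dom_create_weighted_matrix_py serializedMatrix → Spec_create_weighted_matrix_py serializedMatrix (create_weighted_matrix_py serializedMatrix)

-- ===== LEMMAS AND PROOFS =====

-- the matrix whose (a,b) entry is s[a]*s[b] where `c a b`, and 0 elsewhere
def pvGrid (s : List Int) (c : Nat → Nat → Bool) : List (List Int) :=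
  (List.range s.length).map (fun a =>
    (List.range s.length).map (fun b =>
      if c a b then s.getD a 0 * s.getD b 0 else 0))

theorem pvGrid_ext (s : List Int) (c₁ c₂ : Nat → Nat → Bool)
    (h : ∀ a < s.length, ∀ b < s.length, c₁ a b = c₂ a b) :
    pvGrid s c₁ = pvGrid s c₂ := by
  unfold pvGrid
  refine List.map_congr_left ?_
  intro a ha
  rw [List.mem_range] at ha
  refine List.map_congr_left ?_
  intro b hb
  rw [List.mem_range] at hb
  rw [h a ha b hb]

theorem pvSetAt_grid (s : List Int) (c : Nat → Nat → Bool) (i j : Nat) :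
    pvSetAt (pvGrid s c) i j (s.getD i 0 * s.getD j 0) =
      pvGrid s (fun a b => (a == i && b == j) || c a b) := by
  unfold pvSetAt pvGrid
  apply List.ext_getElem
  · simp
  · intro a ha ha'
    simp only [List.length_modify, List.length_map, List.length_range] at ha
    rw [List.getElem_modify]
    simp only [List.getElem_map, List.getElem_range]
    by_cases hia : i = a
    · subst hia
      rw [if_pos rfl]
      apply List.ext_getElem
      · simp
      · intro b hb hb'
        simp only [List.length_set, List.length_map, List.length_range] at hb
        rw [List.getElem_set]
        simp only [List.getElem_map, List.getElem_range]
        by_cases hjb : j = b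
        · subst hjb
          rw [if_pos rfl, if_pos (by simp)]
        · rw [if_neg hjb]
          have hbj : (b == j) = false := by
            simp only [beq_eq_false_iff_ne]; exact fun h => hjb h.symm
          simp [hbj]
    · rw [if_neg hia]
      refine List.map_congr_left ?_
      intro b hb
      have hai : (a == i) = false := by
        simp only [beq_eq_false_iff_ne]; exact fun h => hia h.symm
      simp [hai]

-- after B's inner loop at row i has processed j ∈ [i, t), the filled entries are
-- exactly those with a < i ∨ b < i ∨ (a = i ∧ b < t) ∨ (b = i ∧ a < t)
def pvCIn (i t : Nat) (a b : Nat) : Bool :=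
  decide (a < i) || decide (b < i) || (a == i && decide (b < t)) || (b == i && decide (a < t))

theorem pv_inner (s : List Int) (i : Nat) (_hi : i < s.length) :
    ∀ (k t : Nat), t + k = s.length → i ≤ t →
      (List.range' t k).foldl (pvFillStep s i) (pvGrid s (pvCIn i t)) =
        pvGrid s (pvCIn i s.length) := by
  intro k
  induction k with
  | zero =>
    intro t ht _
    simp [List.range', ht.symm]
  | succ k ih =>
    intro t ht hit
    have hts : t < s.length := by omega
    rw [List.range'_succ, List.foldl_cons]
    have hstep : pvFillStep s i (pvGrid s (pvCIn i t)) t = pvGrid s (pvCIn i (t + 1)) := by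
      show pvSetAt (pvSetAt (pvGrid s (pvCIn i t)) i t (s.getD i 0 * s.getD t 0)) t i
          (s.getD i 0 * s.getD t 0) = _
      rw [pvSetAt_grid s _ i t]
      rw [mul_comm (s.getD i 0)]
      rw [pvSetAt_grid s _ t i]
      apply pvGrid_ext
      intro a ha b hb
      rw [Bool.eq_iff_iff]
      simp only [pvCIn, Bool.or_eq_true, Bool.and_eq_true, decide_eq_true_eq, beq_iff_eq]
      omega
    rw [hstep, ih (t + 1) (by omega) (by omega)]

-- before B's outer loop has processed i ∈ [0, k), the filled entries are those with a < k ∨ b < k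
def pvCOut (k : Nat) (a b : Nat) : Bool := decide (a < k) || decide (b < k)

theorem pv_outer (s : List Int) :
    ∀ (k : Nat), k ≤ s.length →
      (List.range k).foldl
          (fun result i => (List.range' i (s.length - i)).foldl (pvFillStep s i) result)
          (pvGrid s (pvCOut 0)) =
        pvGrid s (pvCOut k) := by
  intro k
  induction k with
  | zero => intro _; rfl
  | succ k ih =>
    intro hk
    rw [List.range_succ, List.foldl_append, ih (by omega), List.foldl_cons, List.foldl_nil]
    have h1 : pvGrid s (pvCOut k) = pvGrid s (pvCIn k k) := by
      apply pvGrid_ext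
      intro a ha b hb
      rw [Bool.eq_iff_iff]
      simp only [pvCOut, pvCIn, Bool.or_eq_true, Bool.and_eq_true, decide_eq_true_eq, beq_iff_eq]
      omega
    rw [h1, pv_inner s k (by omega) (s.length - k) k (by omega) (le_refl k)]
    apply pvGrid_ext
    intro a ha b hb
    rw [Bool.eq_iff_iff]
    simp only [pvCOut, pvCIn, Bool.or_eq_true, Bool.and_eq_true, decide_eq_true_eq, beq_iff_eq]
    omega

theorem pv_init (s : List Int) :
    List.replicate s.length (List.replicate s.length 0) = pvGrid s (pvCOut 0) := by
  unfold pvGrid pvCOut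
  simp [List.map_const']

theorem pv_alt_eq_grid (s : List Int) :
    create_weighted_matrix_py_alt s = pvGrid s (fun _ _ => true) := by
  unfold create_weighted_matrix_py_alt
  rw [pv_init, pv_outer s s.length (le_refl _)]
  apply pvGrid_ext
  intro a ha b hb
  simp only [pvCOut, Bool.or_eq_true, decide_eq_true_eq]
  omega

theorem pv_a_eq_grid (s : List Int) :
    create_weighted_matrix_py s = pvGrid s (fun _ _ => true) := by
  unfold create_weighted_matrix_py
  rw [PySem.List.foldl_append_singleton_eq_map]
  simp only [PySem.List.foldl_append_singleton_eq_map, List.nil_append]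
  unfold pvGrid
  rw [PySem.List.pyRange_one]
  simp only [Int.sub_zero, Int.toNat_natCast, List.map_map]
  refine List.map_congr_left ?_
  intro a ha
  rw [List.mem_range] at ha
  refine List.map_congr_left ?_
  intro b hb
  rw [List.mem_range] at hb
  simp only [Function.comp, Int.zero_add, if_pos]
  rw [PySem.List.pyGetD_natCast, PySem.List.pyGetD_natCast]

-- ===== VERDICT (by name: the statement is the Claim_ definition above) =====
theorem create_weighted_matrix_py_spec : Claim_equal_create_weighted_matrix_py := by
  intro s _
  unfold Spec_create_weighted_matrix_py
  rw [pv_a_eq_grid, pv_alt_eq_grid]
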